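-- pv_equiv track=rewrite | github.com/JoJoJacKy/datastructures | Chapter5OptimizingCodeBigO.py | doubleThenSum
-- ===== SOURCE A (Python) =====
-- def doubleThenSum(listArray):
--     doubledArray = []
--     for i in listArray:
--         doubled = i * 2
--         doubledArray.append(doubled)
--
--     doubledSums = 0
--     for i in doubledArray:
--         doubledSums += i
--
--     return doubledSums
-- ===== SOURCE B (Python) =====
-- def doubleThenSum(listArray):
--     return 2 * sum(listArray)
-- ===== Notes on version B (the rewrite author's own statement) =====
-- stated objective: simpler
-- what changed: B sums the original values in a single builtin pass and multiplies the total by 2 once, instead of building an intermediate doubled list and then summing it in a second loop.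
import Mathlib
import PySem

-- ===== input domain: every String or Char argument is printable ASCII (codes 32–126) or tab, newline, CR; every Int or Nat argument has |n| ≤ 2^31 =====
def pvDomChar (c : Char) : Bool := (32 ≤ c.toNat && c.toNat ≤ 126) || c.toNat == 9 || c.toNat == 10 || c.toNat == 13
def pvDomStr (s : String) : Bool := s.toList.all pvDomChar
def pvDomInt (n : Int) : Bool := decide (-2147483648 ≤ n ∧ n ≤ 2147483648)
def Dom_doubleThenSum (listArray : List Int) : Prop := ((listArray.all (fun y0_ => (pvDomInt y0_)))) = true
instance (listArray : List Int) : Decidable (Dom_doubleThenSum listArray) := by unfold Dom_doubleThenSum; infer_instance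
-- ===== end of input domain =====

-- ===== PORT A =====
-- A: builds the doubled list, then sums it in a second loop.
def doubleThenSum (listArray : List Int) : Int :=
  let doubledArray := listArray.foldl (fun acc i => acc ++ [i * 2]) []
  doubledArray.foldl (fun doubledSums i => doubledSums + i) 0

-- ===== PORT B =====
-- B (simpler): sum the originals once, then multiply by 2.
def doubleThenSum_alt (listArray : List Int) : Int :=
  2 * listArray.sum

-- ===== PRECONDITION & SPEC =====
def Spec_doubleThenSum (listArray : List Int) (out : Int) : Prop := out = doubleThenSum_alt listArray
instance (listArray : List Int) (out : Int) : Decidable (Spec_doubleThenSum listArray out) := by unfold Spec_doubleThenSum; infer_instance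

-- ===== CLAIM (what is proved, stated in full; the proofs are below) =====
def Claim_equal_doubleThenSum : Prop := ∀ (listArray : List Int), Dom_doubleThenSum listArray → Spec_doubleThenSum listArray (doubleThenSum listArray)

-- ===== LEMMAS AND PROOFS =====

-- ===== VERDICT (by name: the statement is the Claim_ definition above) =====
lemma foldl_append_double (l : List Int) (acc : List Int) :
    l.foldl (fun acc i => acc ++ [i * 2]) acc = acc ++ l.map (· * 2) := by
  induction l generalizing acc with
  | nil => simp
  | cons x xs ih => simp [List.foldl, ih]

lemma foldl_add_sum (l : List Int) (s : Int) :
    l.foldl (fun a i => a + i) s = s + l.sum := by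
  induction l generalizing s with
  | nil => simp
  | cons x xs ih => simp [List.foldl, ih]; ring

theorem doubleThenSum_spec : Claim_equal_doubleThenSum := by
  intro listArray _
  unfold Spec_doubleThenSum doubleThenSum doubleThenSum_alt
  rw [foldl_append_double, foldl_add_sum]
  simp [List.sum_map_mul_right]
  ring
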